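-- pv_equiv track=rewrite | github.com/soham-bagchi-ug22/AssociationRuleMining | ASMR.py | createTransactionFrequency
-- ===== SOURCE A (Python) =====
-- def checkExists(item, dictionary):
-- 	if(item in dictionary):
-- 		return True
-- 	return False
--
-- def createTransactionFrequency(uniqueItems, transactionList):
-- 	T = [[] for i in range(len(uniqueItems))]
-- 	for i in range(len(uniqueItems)):
-- 		tList_ = []
-- 		for j in range(len(transactionList)):
-- 			if(checkExists(uniqueItems[i], transactionList[j])):
-- 				tList_.append(j)
-- 		T[i] = tList_
-- 	return T
-- ===== SOURCE B (Python) =====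
-- def createTransactionFrequency(uniqueItems, transactionList):
--     occ = {}
--     for j, transaction in enumerate(transactionList):
--         for item in dict.fromkeys(transaction):
--             occ.setdefault(item, []).append(j)
--     return [occ.get(item, []) for item in uniqueItems]
-- ===== Notes on version B (the rewrite author's own statement) =====
-- stated objective: faster
-- what changed: Replaces the per-item scan of all transactions by one pass over the transactions that appends each index to its items' lists in a dict, then reads the lists off per unique item.
import Mathlib
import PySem

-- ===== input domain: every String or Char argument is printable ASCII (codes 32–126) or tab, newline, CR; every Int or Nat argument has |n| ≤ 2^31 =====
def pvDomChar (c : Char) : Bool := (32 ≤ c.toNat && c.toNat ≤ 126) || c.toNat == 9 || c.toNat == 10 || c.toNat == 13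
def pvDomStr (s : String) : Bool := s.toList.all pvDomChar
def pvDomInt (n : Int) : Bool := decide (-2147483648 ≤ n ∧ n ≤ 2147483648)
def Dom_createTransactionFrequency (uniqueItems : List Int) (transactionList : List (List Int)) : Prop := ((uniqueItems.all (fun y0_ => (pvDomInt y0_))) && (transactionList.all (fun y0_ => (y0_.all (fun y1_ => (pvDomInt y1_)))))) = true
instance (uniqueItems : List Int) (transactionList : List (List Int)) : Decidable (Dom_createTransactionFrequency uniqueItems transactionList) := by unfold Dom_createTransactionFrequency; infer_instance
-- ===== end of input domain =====

-- ===== PORT A =====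
-- B replaces the per-item scan of all transactions by one indexing pass over the transactions (faster).
-- checkExists(item, dictionary): 'item in dictionary' on a list is membership
def checkExists (item : Int) (dictionary : List Int) : Bool :=
  if item ∈ dictionary then true else false

def createTransactionFrequency (uniqueItems : List Int) (transactionList : List (List Int)) : List (List Int) :=
  -- T = [[] for i in range(len(uniqueItems))]
  let T0 : List (List Int) := (List.range uniqueItems.length).map (fun _ => ([] : List Int))
  -- for i in range(len(uniqueItems)): tList_ = []; for j ...: if checkExists: append j; T[i] = tList_
  (PySem.List.pyRange 0 uniqueItems.length 1).foldl
    (fun T i =>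
      let tList := (PySem.List.pyRange 0 transactionList.length 1).foldl
        (fun acc j =>
          if checkExists (PySem.List.pyGetD uniqueItems i 0) (PySem.List.pyGetD transactionList j []) then
            acc ++ [j] else acc) []
      T.set i.toNat tList)
    T0

-- ===== PORT B =====
def createTransactionFrequency_alt (uniqueItems : List Int) (transactionList : List (List Int)) : List (List Int) :=
  -- occ = {}; for j, transaction in enumerate(transactionList): for item in dict.fromkeys(transaction): occ.setdefault(item, []).append(j)
  let occ : PySem.Dict Int (List Int) :=
    (PySem.List.enumerate transactionList).foldl
      (fun d p => (PySem.List.dedup p.2).foldl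
        (fun d item => d.modify item ([] : List Int) (fun l => l ++ [p.1])) d)
      PySem.Dict.empty
  -- [occ.get(item, []) for item in uniqueItems]
  uniqueItems.map (fun item => occ.getD item [])

-- ===== PRECONDITION & SPEC =====
def Spec_createTransactionFrequency (uniqueItems : List Int) (transactionList : List (List Int)) (out : List (List Int)) : Prop := out = createTransactionFrequency_alt uniqueItems transactionList
instance (uniqueItems : List Int) (transactionList : List (List Int)) (out : List (List Int)) : Decidable (Spec_createTransactionFrequency uniqueItems transactionList out) := by unfold Spec_createTransactionFrequency; infer_instance

-- ===== CLAIM (what is proved, stated in full; the proofs are below) =====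
def Claim_equal_createTransactionFrequency : Prop := ∀ (uniqueItems : List Int) (transactionList : List (List Int)), Dom_createTransactionFrequency uniqueItems transactionList → Spec_createTransactionFrequency uniqueItems transactionList (createTransactionFrequency uniqueItems transactionList)

-- ===== LEMMAS AND PROOFS =====

-- the list of indices of transactions containing c, in order
def hits (transactionList : List (List Int)) (c : Int) : List Int :=
  ((PySem.List.pyRange 0 transactionList.length 1).filter
    (fun j => decide (c ∈ PySem.List.pyGetD transactionList j [])))

lemma checkExists_eq (a : Int) (l : List Int) : checkExists a l = decide (a ∈ l) := by
  simp [checkExists]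

-- A's inner loop computes hits
lemma innerA_eq_hits (uniqueItems : List Int) (transactionList : List (List Int)) (i : Int) :
    (PySem.List.pyRange 0 transactionList.length 1).foldl
      (fun acc j =>
        if checkExists (PySem.List.pyGetD uniqueItems i 0) (PySem.List.pyGetD transactionList j []) then
          acc ++ [j] else acc) [] = hits transactionList (PySem.List.pyGetD uniqueItems i 0) := by
  rw [PySem.List.foldl_append_if
    (fun j => checkExists (PySem.List.pyGetD uniqueItems i 0) (PySem.List.pyGetD transactionList j []))
    (fun j => j) (PySem.List.pyRange 0 transactionList.length 1) []]
  simp only [checkExists_eq, List.map_id_fun', id, List.nil_append, hits]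

-- set-loop: writing g(u[m]) at position m for m = 0..n-1 into a length-n list of []s yields (u.take m).map g ++ padding
lemma set_loop (u : List Int) (g : Int → List Int) (m : Nat) (hm : m ≤ u.length) :
    (PySem.List.pyRange 0 (m : Int) 1).foldl
      (fun T i => T.set i.toNat (g (PySem.List.pyGetD u i 0)))
      (List.replicate u.length ([] : List Int))
    = (u.take m).map g ++ List.replicate (u.length - m) ([] : List Int) := by
  induction m with
  | zero => simp [PySem.List.pyRange_one_eq_nil]
  | succ k ih =>
    have hk : k ≤ u.length := Nat.le_of_succ_le hm
    have hlt : k < u.length := hm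
    rw [show ((k + 1 : Nat) : Int) = (k : Int) + 1 by push_cast; ring,
        PySem.List.pyRange_one_succ_right (by positivity), List.foldl_append, ih hk]
    simp only [List.foldl_cons, List.foldl_nil]
    have hget : PySem.List.pyGetD u (k : Int) 0 = u[k] := by
      rw [PySem.List.pyGetD_natCast]
      simp [hlt]
    have hrep : u.length - k = (u.length - (k+1)) + 1 := by omega
    rw [hget, hrep, List.replicate_succ]
    have hlen : ((u.take k).map g).length = k := by simp [hk]
    rw [show ((k:Int).toNat) = k by simp, List.set_append]
    rw [if_neg (by omega), hlen, Nat.sub_self, List.set_cons_zero]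
    have h5 : List.take (k+1) (u.map g) = List.take k (u.map g) ++ [g u[k]] := by
      rw [List.take_add_one, List.getElem?_eq_getElem (show k < (List.map g u).length by simpa using hlt)]
      simp
    simp only [← List.map_take] at h5 ⊢
    rw [h5]
    simp

-- A's whole fold is the map of hits
lemma A_eq_map (uniqueItems : List Int) (transactionList : List (List Int)) :
    createTransactionFrequency uniqueItems transactionList
      = uniqueItems.map (fun c => hits transactionList c) := by
  show (PySem.List.pyRange 0 uniqueItems.length 1).foldl _ _ = _
  have hbody : (fun (T : List (List Int)) (i : Int) =>
      T.set i.toNat ((PySem.List.pyRange 0 transactionList.length 1).foldl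
        (fun acc j =>
          if checkExists (PySem.List.pyGetD uniqueItems i 0) (PySem.List.pyGetD transactionList j []) then
            acc ++ [j] else acc) []))
      = fun T i => T.set i.toNat (hits transactionList (PySem.List.pyGetD uniqueItems i 0)) := by
    funext T i
    rw [innerA_eq_hits]
  rw [hbody, List.map_const', List.length_range, set_loop uniqueItems
    (fun c => hits transactionList c) uniqueItems.length le_rfl]
  simp

lemma flatMap_if_eq_filter (l : List Int) (q : Int → Bool) :
    l.flatMap (fun j => if q j then [j] else []) = l.filter q := by
  induction l with
  | nil => rfl
  | cons x xs ih => simp [List.flatMap_cons, List.filter_cons, ih]; split <;> simp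

lemma filter_map_pair {j c : Int} (l : List Int) (h : l.Nodup) :
    ((l.map (fun x => (x, j))).filter (fun q => q.1 == c)).map (fun q => q.2)
      = if c ∈ l then [j] else [] := by
  induction l with
  | nil => simp
  | cons x xs ih =>
    simp only [List.nodup_cons] at h
    by_cases hx : x = c
    · subst hx
      simp [h.1, ih h.2]
    · simp [hx, ih h.2, List.mem_cons, Ne.symm hx]

-- B's dict lookup computes hits
lemma B_getD_eq_hits (transactionList : List (List Int)) (c : Int) :
    ((PySem.List.enumerate transactionList).foldl
      (fun d p => (PySem.List.dedup p.2).foldl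
        (fun d item => d.modify item ([] : List Int) (fun l => l ++ [p.1])) d)
      PySem.Dict.empty).getD c [] = hits transactionList c := by
  have h1 : ∀ (d : PySem.Dict Int (List Int)),
      (PySem.List.enumerate transactionList).foldl
        (fun d p => (PySem.List.dedup p.2).foldl
          (fun d item => d.modify item ([] : List Int) (fun l => l ++ [p.1])) d) d
      = ((PySem.List.enumerate transactionList).flatMap
          (fun p => (PySem.List.dedup p.2).map (fun item => (item, p.1)))).foldl
          (fun d q => d.modify q.1 ([] : List Int) (fun l => l ++ [q.2])) d := by
    intro d
    rw [List.foldl_flatMap]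
    congr 1
    funext d p
    rw [List.foldl_map]
  rw [h1, PySem.Dict.getD_foldl_modify_append]
  simp only [PySem.Dict.getD_empty, List.nil_append]
  rw [List.filter_flatMap, List.map_flatMap]
  have h2 : ∀ p : Int × List Int,
      (((PySem.List.dedup p.2).map (fun item => (item, p.1))).filter (fun q => q.1 == c)).map (fun q => q.2)
        = if c ∈ p.2 then [p.1] else [] := by
    intro p
    rw [filter_map_pair _ (PySem.List.nodup_dedup p.2)]
    simp
  simp only [h2]
  rw [PySem.List.enumerate_eq_map_pyRange transactionList ([] : List Int), List.flatMap_map]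
  simp only [PySem.List.len_eq] at *
  rw [hits, ← flatMap_if_eq_filter]
  congr 1
  funext a
  simp

-- ===== VERDICT (by name: the statement is the Claim_ definition above) =====
theorem createTransactionFrequency_spec : Claim_equal_createTransactionFrequency := by
  intro u t _
  show _ = _
  rw [A_eq_map, createTransactionFrequency_alt]
  simp only [B_getD_eq_hits]
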